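-- pv_equiv track=rewrite | github.com/Julien-G-Man/verimed | backend/utils/normalization.py | extract_brand_name
-- ===== SOURCE A (Python) =====
-- def extract_brand_name(front_text: str, known_brands: list[str] | None = None) -> str | None:
--     if known_brands:
--         lower = front_text.lower()
--         # Sort longest first so specific names win over shorter substrings (e.g. "Panadol Extra" before "Panadol")
--         for brand in sorted(known_brands, key=len, reverse=True):
--             if brand.lower() in lower:
--                 return brand
--     lines = [line.strip() for line in front_text.splitlines() if line.strip()]
--     if lines:
--         return lines[0]
--     return None
-- ===== SOURCE B (Python) =====
-- def extract_brand_name(front_text: str, known_brands: list[str] | None = None) -> str | None: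
--     if known_brands:
--         lower = front_text.lower()
--         best = None
--         for b in known_brands:
--             if (best is None or len(best) < len(b)) and b.lower() in lower:
--                 best = b
--         if best is not None:
--             return best
--     for line in front_text.splitlines():
--         stripped = line.strip()
--         if stripped:
--             return stripped
--     return None
-- ===== Notes on version B (the rewrite author's own statement) =====
-- stated objective: alternative
-- what changed: B replaces A's longest-first sort plus first-match scan by a single pass over known_brands keeping a running argmax (longest matching brand, first among ties, testing containment only when a brand is longer than the current best), and the fallback is an early-return loop over splitlines instead of building the stripped-lines list.
import Mathlib
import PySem

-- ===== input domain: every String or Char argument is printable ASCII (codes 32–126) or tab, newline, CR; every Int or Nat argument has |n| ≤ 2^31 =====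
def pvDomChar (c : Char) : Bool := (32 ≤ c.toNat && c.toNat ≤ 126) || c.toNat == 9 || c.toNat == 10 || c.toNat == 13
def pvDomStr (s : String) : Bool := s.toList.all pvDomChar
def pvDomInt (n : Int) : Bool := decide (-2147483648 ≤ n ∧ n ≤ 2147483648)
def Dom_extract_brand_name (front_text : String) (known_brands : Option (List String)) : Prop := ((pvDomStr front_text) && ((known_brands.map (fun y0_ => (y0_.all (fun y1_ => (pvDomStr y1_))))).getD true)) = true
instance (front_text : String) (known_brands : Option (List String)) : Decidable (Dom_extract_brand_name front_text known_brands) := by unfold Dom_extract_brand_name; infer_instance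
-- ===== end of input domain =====

-- B removes A's longest-first sort: one pass over known_brands keeps a running argmax
-- (longest matching brand, first among ties); the fallback returns early from a loop.

-- ===== PORT A =====
def extract_brand_name (front_text : String) (known_brands : Option (List String)) : Option String :=
  let fallback : Option String :=
    let lines := ((PySem.Str.splitlines front_text).filter
        (fun line => PySem.Str.strip line != "")).map PySem.Str.strip
    match lines with
    | l :: _ => some l
    | [] => none
  match known_brands with
  | some brands =>
    if brands ≠ [] then
      let lower := PySem.Str.lower front_text
      match (PySem.List.sorted brands (fun b => PySem.Str.len b) true).find?
          (fun b => PySem.Str.isIn (PySem.Str.lower b) lower) with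
      | some b => some b
      | none => fallback
    else fallback
  | none => fallback

-- ===== PORT B =====
def extract_brand_name_alt (front_text : String) (known_brands : Option (List String)) : Option String :=
  let brandMatch : Option String :=
    match known_brands with
    | some brands =>
      if brands ≠ [] then
        let lower := PySem.Str.lower front_text
        brands.foldl (fun best b =>
          if (match best with
              | none => true
              | some m => decide (PySem.Str.len m < PySem.Str.len b))
              && PySem.Str.isIn (PySem.Str.lower b) lower then some b else best) none
      else none
    | none => none
  match brandMatch with
  | some b => some b
  | none =>
    ((PySem.Str.splitlines front_text).find?
        (fun line => PySem.Str.strip line != "")).map PySem.Str.strip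

-- ===== PRECONDITION & SPEC =====
def Spec_extract_brand_name (front_text : String) (known_brands : Option (List String)) (out : Option String) : Prop := out = extract_brand_name_alt front_text known_brands
instance (front_text : String) (known_brands : Option (List String)) (out : Option String) : Decidable (Spec_extract_brand_name front_text known_brands out) := by unfold Spec_extract_brand_name; infer_instance

-- ===== CLAIM (what is proved, stated in full; the proofs are below) =====
def Claim_equal_extract_brand_name : Prop := ∀ (front_text : String) (known_brands : Option (List String)), Dom_extract_brand_name front_text known_brands → Spec_extract_brand_name front_text known_brands (extract_brand_name front_text known_brands)

-- ===== LEMMAS AND PROOFS =====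

-- the first non-filtered element of a mapped filter is the mapped first match
theorem head_filter_map_eq_find?_map (q : String → Bool) (f : String → String) (l : List String) :
    (match (l.filter q).map f with
     | a :: _ => some a
     | [] => none) = (l.find? q).map f := by
  induction l with
  | nil => rfl
  | cons y t ih =>
    by_cases hq : q y = true
    · simp [List.filter, List.find?, hq]
    · simp only [List.filter, List.find?, Bool.not_eq_true] at *
      simp [hq, ih]

-- finding the first match after a stable descending insertion of x
theorem find?_insertBy (key : String → Int) (p : String → Bool) (x : String) (l : List String)
    (hl : l.Pairwise (fun a b => key b ≤ key a)) :
    (PySem.List.insertBy (fun a b => decide (key b < key a)) x l).find? p =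
      (match l.find? p with
       | none => if p x then some x else none
       | some m => if p x && decide (key m < key x) then some x else some m) := by
  induction l with
  | nil => by_cases hp : p x = true <;> simp [PySem.List.insertBy, List.find?, hp]
  | cons y t ih =>
    have hyt : ∀ m ∈ t, key m ≤ key y := fun m hm => List.rel_of_pairwise_cons hl hm
    have ht : t.Pairwise (fun a b => key b ≤ key a) := hl.of_cons
    by_cases hk : key y < key x
    · -- x goes in front of y
      have hstep : PySem.List.insertBy (fun a b => decide (key b < key a)) x (y :: t)
          = x :: y :: t := by simp [PySem.List.insertBy, hk]
      rw [hstep]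
      cases hfind : (y :: t).find? p with
      | none =>
        by_cases hp : p x = true <;> simp only [List.find?_cons, hp, hfind] <;> simp
      | some m =>
        have hm : m ∈ y :: t := List.mem_of_find?_eq_some hfind
        have hmy : key m ≤ key y := by
          rcases List.mem_cons.mp hm with h | h
          · exact h ▸ le_refl _
          · exact hyt m h
        have hmx : key m < key x := lt_of_le_of_lt hmy hk
        by_cases hp : p x = true <;> simp only [List.find?_cons, hp, hfind] <;> simp [hmx]
    · -- x goes after y
      have hstep : PySem.List.insertBy (fun a b => decide (key b < key a)) x (y :: t)
          = y :: PySem.List.insertBy (fun a b => decide (key b < key a)) x t := by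
        simp [PySem.List.insertBy, hk]
      rw [hstep]
      by_cases hp : p y = true
      · have hnx : ¬ key y < key x := hk
        simp [List.find?, hp, hnx]
      · simp only [List.find?_cons, hp]
        rw [ih ht]

-- first match in the longest-first stable sort = first maximal-length match in original order
theorem find?_sorted_rev_eq_max?_filter (key : String → Int) (p : String → Bool) (xs : List String) :
    (PySem.List.sorted xs key true).find? p = PySem.List.max? (xs.filter p) key := by
  induction xs using List.reverseRecOn with
  | nil => rfl
  | append_singleton t x ih =>
    have hs : PySem.List.sorted (t ++ [x]) key true
        = PySem.List.insertBy (fun a b => decide (key b < key a)) x (PySem.List.sorted t key true) := by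
      rw [PySem.List.sorted_rev_eq_foldl_insertBy, PySem.List.sorted_rev_eq_foldl_insertBy,
        List.foldl_append]
      rfl
    rw [hs, find?_insertBy key p x _ (PySem.List.sorted_pairwise_rev t key), ih]
    have hmaxstep : ∀ (ys : List String),
        PySem.List.max? (ys ++ [x]) key
          = (match PySem.List.max? ys key with
             | none => some x
             | some m => if key m < key x then some x else some m) := by
      intro ys
      cases hmy : PySem.List.max? ys key with
      | none =>
        rw [PySem.List.max?_eq_none_iff] at hmy
        subst hmy
        rfl
      | some m =>
        simp only [PySem.List.max?] at hmy ⊢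
        rw [List.foldl_append, hmy]
        rfl
    by_cases hp : p x = true
    · rw [List.filter_append]
      simp only [List.filter, hp]
      rw [hmaxstep]
      cases PySem.List.max? (t.filter p) key with
      | none => simp
      | some m => by_cases hm : key m < key x <;> simp [hm]
    · rw [List.filter_append]
      simp only [List.filter, hp, Bool.false_eq_true, List.append_nil]
      cases PySem.List.max? (t.filter p) key with
      | none => simp
      | some m => simp

-- B's guarded running-argmax loop is the max?-fold of the filtered list
theorem foldl_best_eq_foldl_filter (front_text : String) (l : List String) (acc : Option String) :
    l.foldl (fun best b =>
        if (match best with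
            | none => true
            | some m => decide (PySem.Str.len m < PySem.Str.len b))
            && PySem.Str.isIn (PySem.Str.lower b) (PySem.Str.lower front_text) then some b else best) acc
      = (l.filter (fun b => PySem.Str.isIn (PySem.Str.lower b) (PySem.Str.lower front_text))).foldl
          (fun acc x =>
            match acc with
            | none => some x
            | some m => if PySem.Str.len m < PySem.Str.len x then some x else some m) acc := by
  induction l generalizing acc with
  | nil => rfl
  | cons b t ih =>
    by_cases hp : PySem.Str.isIn (PySem.Str.lower b) (PySem.Str.lower front_text) = true
    · cases acc with
      | none =>
        simp only [List.foldl_cons, List.filter_cons, hp, Bool.and_true, if_true, ih]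
      | some m =>
        simp only [List.foldl_cons, List.filter_cons, hp, Bool.and_true,
          decide_eq_true_eq, if_true, ih]
    · have hp' : PySem.Str.isIn (PySem.Str.lower b) (PySem.Str.lower front_text) = false :=
        eq_false_of_ne_true hp
      cases acc with
      | none =>
        simp only [List.foldl_cons, List.filter_cons, hp', Bool.and_false, Bool.false_eq_true,
          if_false, ih]
      | some m =>
        simp only [List.foldl_cons, List.filter_cons, hp', Bool.and_false, Bool.false_eq_true,
          if_false, ih]

-- ===== VERDICT (by name: the statement is the Claim_ definition above) =====
theorem extract_brand_name_spec : Claim_equal_extract_brand_name := by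
  intro front_text known_brands _
  unfold Spec_extract_brand_name extract_brand_name extract_brand_name_alt
  have hfb := head_filter_map_eq_find?_map
    (fun line => PySem.Str.strip line != "") PySem.Str.strip (PySem.Str.splitlines front_text)
  cases known_brands with
  | none => simpa using hfb
  | some brands =>
    by_cases hb : brands = []
    · subst hb; simpa using hfb
    · simp only [hb, ne_eq, not_false_eq_true, if_true]
      rw [find?_sorted_rev_eq_max?_filter, foldl_best_eq_foldl_filter front_text brands none,
        show (PySem.List.max?
            (brands.filter (fun b => PySem.Str.isIn (PySem.Str.lower b) (PySem.Str.lower front_text)))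
            (fun b => PySem.Str.len b))
          = ((brands.filter
              (fun b => PySem.Str.isIn (PySem.Str.lower b) (PySem.Str.lower front_text))).foldl
                (fun acc x =>
                  match acc with
                  | none => some x
                  | some m => if PySem.Str.len m < PySem.Str.len x then some x else some m) none)
          from by
            simp only [PySem.List.max?]
            congr 1
            funext acc x
            cases acc <;> rfl]
      cases ((brands.filter
          (fun b => PySem.Str.isIn (PySem.Str.lower b) (PySem.Str.lower front_text))).foldl
            (fun acc x =>
              match acc with
              | none => some x
              | some m => if PySem.Str.len m < PySem.Str.len x then some x else some m) none) with
      | some m => rfl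
      | none => exact hfb
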